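-- pv_equiv track=rewrite | github.com/CdeMills/convertBNP | convertBNP_5col.py | mois_dispos
-- ===== SOURCE A (Python) =====
-- PREFIXE_COMPTE = "123456789"
--
-- def mois_dispos(liste):
--     """Renvoie une liste des relevés disponibles de la forme
--     [['2012', '10', '11', '12']['2013', '01', '02', '03', '04']]"""
--     liste_tout = []
--     les_annees = []
--
--     for releve in liste:
--         operation = releve.split('.')   # strip the extension
--         operation = operation[0].split('_')   # get chunks
--         if "FRAIS" in operation[0]:
--             continue
--         for num, val in enumerate(operation[1:]):
--             if PREFIXE_COMPTE not in val:
--                 continue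
--             # the next element contains the date
--             annee = operation[num+2][0:4]
--             mois  = operation[num+2][4:6]
--             if annee not in les_annees:
--                 les_annees.append(annee)
--                 liste_annee = [annee, mois]
--                 liste_tout.append(liste_annee)
--             else:
--                 liste_tout[les_annees.index(annee)].append(mois)
--     liste_tout.sort()
--     return liste_tout
-- ===== SOURCE B (Python) =====
-- PREFIXE_COMPTE = "123456789"
--
-- def mois_dispos(liste):
--     """Renvoie une liste des relevés disponibles de la forme
--     [['2012', '10', '11', '12']['2013', '01', '02', '03', '04']]"""
--     # One flat pass: collect every (annee, mois) pair in encounter order.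
--     paires = []
--     for releve in liste:
--         operation = releve.split('.')[0].split('_')
--         if "FRAIS" in operation[0]:
--             continue
--         for num, val in enumerate(operation[1:]):
--             if PREFIXE_COMPTE in val:
--                 date = operation[num + 2]
--                 paires.append((date[0:4], date[4:6]))
--     # Rows: one per distinct year, years ascending, months in encounter order.
--     return [[annee] + [m for a, m in paires if a == annee]
--             for annee in sorted(dict.fromkeys(a for a, _ in paires))]
-- ===== Notes on version B (the rewrite author's own statement) =====
-- stated objective: alternative
-- what changed: Instead of grouping on the fly with les_annees.index and in-place row mutation followed by a final full-row sort, B collects all (year, month) pairs in one flat pass and then builds each row by filtering the pair list per year, iterating over the sorted distinct years.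
import Mathlib
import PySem

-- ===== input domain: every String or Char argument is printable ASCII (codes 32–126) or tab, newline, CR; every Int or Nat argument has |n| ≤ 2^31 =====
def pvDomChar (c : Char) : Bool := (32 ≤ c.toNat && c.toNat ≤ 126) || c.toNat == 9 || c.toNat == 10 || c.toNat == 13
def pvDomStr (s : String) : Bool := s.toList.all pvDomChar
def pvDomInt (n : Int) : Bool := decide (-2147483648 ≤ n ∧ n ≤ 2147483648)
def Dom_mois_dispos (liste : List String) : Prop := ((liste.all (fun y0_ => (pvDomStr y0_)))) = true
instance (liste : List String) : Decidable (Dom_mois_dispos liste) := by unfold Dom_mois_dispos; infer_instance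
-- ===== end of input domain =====

-- B replaces A's on-the-fly grouping (les_annees.index + in-place row mutation + final
-- full-row sort) by one flat pass collecting (year, month) pairs, then one row per
-- sorted distinct year built by filtering the pair list (alternative decomposition).

def mdPrefixeCompte : String := "123456789"

-- releve.split('.')[0].split('_')  (both sources begin with exactly these two splits;
-- '.' and '_' are non-empty separators, so split? always returns some, and the result
-- is never [], so [0] is headI)
def mdChunks (releve : String) : List String :=
  (PySem.Str.split? (((PySem.Str.split? releve ".").getD []).headI) "_").getD []

-- annee/mois extracted from operation[num+2] (the default "" of pyGetD is never used
-- on inputs satisfying Pre_: there Python's operation[num+2] does not raise)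
def mdPair (operation : List String) (num : Int) : String × String :=
  let date := PySem.List.pyGetD operation (num + 2) ""
  (PySem.Str.slice date (some 0) (some 4), PySem.Str.slice date (some 4) (some 6))

-- ===== PORT A =====
-- the body of A's inner loop after the two guards: the grouping update of
-- (liste_tout, les_annees)
def mdGroupStep (st : List (List String) × List String) (p : String × String) :
    List (List String) × List String :=
  if p.1 ∉ st.2 then (st.1 ++ [[p.1, p.2]], st.2 ++ [p.1])
  else (st.1.modify ((PySem.List.index? st.2 p.1).getD 0) (fun row => row ++ [p.2]), st.2)

def mois_dispos (liste : List String) : List (List String) :=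
  let st := liste.foldl (fun st releve =>
      let operation := mdChunks releve
      if PySem.Str.isIn "FRAIS" operation.headI then st
      else (PySem.List.enumerate (operation.drop 1)).foldl
        (fun st nv =>
          if PySem.Str.isIn mdPrefixeCompte nv.2 then mdGroupStep st (mdPair operation nv.1)
          else st) st)
    (([], []) : List (List String) × List String)
  PySem.List.sorted st.1 (fun x => x)

-- ===== PORT B =====
def mois_dispos_alt (liste : List String) : List (List String) :=
  let paires := liste.foldl (fun ps releve =>
      let operation := mdChunks releve
      if PySem.Str.isIn "FRAIS" operation.headI then ps
      else (PySem.List.enumerate (operation.drop 1)).foldl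
        (fun ps nv =>
          if PySem.Str.isIn mdPrefixeCompte nv.2 then ps ++ [mdPair operation nv.1]
          else ps) ps)
    ([] : List (String × String))
  (PySem.List.sorted (PySem.List.dedup (paires.map Prod.fst)) (fun x => x)).map
    (fun annee => annee :: (paires.filter (fun p => p.1 == annee)).map Prod.snd)

-- ===== PRECONDITION & SPEC =====
-- Pre_ excludes exactly the inputs where Python A raises IndexError: a filename whose
-- last '_'-chunk contains the account prefix, so that operation[num+2] is out of range.
def Pre_mois_dispos (liste : List String) : Prop :=
  ∀ releve ∈ liste,
    2 ≤ (mdChunks releve).length →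
    PySem.Str.isIn "FRAIS" (mdChunks releve).headI = false →
    PySem.Str.isIn mdPrefixeCompte ((mdChunks releve).getLastD "") = false
instance (liste : List String) : Decidable (Pre_mois_dispos liste) := by
  unfold Pre_mois_dispos; infer_instance

def pvWitness_mois_dispos : List String :=
  ["REL_123456789_20121011.pdf", "REL_123456789_20130102.pdf", "FRAIS_X.pdf"]

def Spec_mois_dispos (liste : List String) (out : List (List String)) : Prop := out = mois_dispos_alt liste
instance (liste : List String) (out : List (List String)) : Decidable (Spec_mois_dispos liste out) := by unfold Spec_mois_dispos; infer_instance

-- ===== CLAIM (what is proved, stated in full; the proofs are below) =====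
def Claim_equal_mois_dispos : Prop := ∀ (liste : List String), Dom_mois_dispos liste → Pre_mois_dispos liste → Spec_mois_dispos liste (mois_dispos liste)

-- ===== LEMMAS AND PROOFS =====

-- the (annee, mois) pairs one releve contributes, in encounter order
def mdPairsRel (releve : String) : List (String × String) :=
  if PySem.Str.isIn "FRAIS" (mdChunks releve).headI then []
  else ((PySem.List.enumerate ((mdChunks releve).drop 1)).filter
          (fun nv => PySem.Str.isIn mdPrefixeCompte nv.2)).map
        (fun nv => mdPair (mdChunks releve) nv.1)

def mdPairs (liste : List String) : List (String × String) := liste.flatMap mdPairsRel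

def mdMonths (ps : List (String × String)) (a : String) : List String :=
  (ps.filter (fun p => p.1 == a)).map Prod.snd

def mdRows (ps : List (String × String)) : List (List String) :=
  (PySem.List.dedup (ps.map Prod.fst)).map (fun a => a :: mdMonths ps a)

-- guarded fold = fold of the step over the filtered/mapped list
theorem md_guard_step {α β γ : Type} (c : α → Bool) (f : α → β) (step : γ → β → γ) :
    ∀ (l : List α) (st : γ),
      l.foldl (fun st x => if c x then step st (f x) else st) st
        = ((l.filter c).map f).foldl step st := by
  intro l
  induction l with
  | nil => intro st; rfl
  | cons x t ih =>
    intro st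
    by_cases h : c x = true <;> simp [h, ih]

-- A's loop body for one releve, in terms of mdPairsRel
theorem md_relA (st : List (List String) × List String) (r : String) :
    (if PySem.Str.isIn "FRAIS" (mdChunks r).headI then st
     else (PySem.List.enumerate ((mdChunks r).drop 1)).foldl
       (fun st nv =>
         if PySem.Str.isIn mdPrefixeCompte nv.2 then mdGroupStep st (mdPair (mdChunks r) nv.1)
         else st) st)
      = (mdPairsRel r).foldl mdGroupStep st := by
  unfold mdPairsRel
  by_cases h : PySem.Str.isIn "FRAIS" (mdChunks r).headI = true
  · rw [if_pos h, if_pos h]; rfl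
  · rw [if_neg h, if_neg h]
    exact md_guard_step _ _ _ _ _

-- B's loop body for one releve, in terms of mdPairsRel
theorem md_relB (ps : List (String × String)) (r : String) :
    (if PySem.Str.isIn "FRAIS" (mdChunks r).headI then ps
     else (PySem.List.enumerate ((mdChunks r).drop 1)).foldl
       (fun ps nv =>
         if PySem.Str.isIn mdPrefixeCompte nv.2 then ps ++ [mdPair (mdChunks r) nv.1]
         else ps) ps)
      = ps ++ mdPairsRel r := by
  unfold mdPairsRel
  by_cases h : PySem.Str.isIn "FRAIS" (mdChunks r).headI = true
  · rw [if_pos h, if_pos h, List.append_nil]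
  · rw [if_neg h, if_neg h]
    exact PySem.List.foldl_append_if _ _ _ _

theorem md_dedup_snoc (xs : List String) (a : String) :
    PySem.List.dedup (xs ++ [a])
      = if a ∈ PySem.List.dedup xs then PySem.List.dedup xs
        else PySem.List.dedup xs ++ [a] := by
  simp [PySem.List.dedup_eq_ofList, PySem.Set.ofList, List.foldl_append, PySem.Set.add]

theorem md_modify_group (l : List String) (hnd : l.Nodup) (a : String) (ha : a ∈ l)
    (f : String → List String) (g : List String → List String) :
    (l.map f).modify ((PySem.List.index? l a).getD 0) g
      = l.map (fun b => if b = a then g (f b) else f b) := by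
  induction l with
  | nil => cases ha
  | cons h t ih =>
    by_cases hha : h = a
    · subst hha
      rw [PySem.List.index?_cons_self]
      simp only [List.map_cons, Option.getD_some, List.modify_zero_cons, if_true]
      have hnotin : h ∉ t := (List.nodup_cons.mp hnd).1
      congr 1
      exact (List.map_congr_left (fun b hb => by
        have hne : b ≠ h := fun e => hnotin (e ▸ hb)
        simp [hne])).symm
    · have hat : a ∈ t := by cases ha with
        | head => exact absurd rfl hha
        | tail _ h' => exact h'
      rw [PySem.List.index?_cons_of_ne t hha]
      obtain ⟨k, hk⟩ := Option.isSome_iff_exists.mp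
        ((PySem.List.index?_isSome_iff t a).mpr hat)
      rw [hk]
      simp only [Option.map_some, Option.getD_some, List.map_cons, List.modify_succ_cons]
      have htl := ih (List.nodup_cons.mp hnd).2 hat
      rw [hk] at htl
      simp only [Option.getD_some] at htl
      rw [htl, if_neg hha]

theorem md_months_snoc (ps : List (String × String)) (a m b : String) :
    mdMonths (ps ++ [(a, m)]) b = mdMonths ps b ++ (if b = a then [m] else []) := by
  by_cases h : b = a
  · subst h; simp [mdMonths, List.filter_append]
  · simp [mdMonths, List.filter_append, beq_iff_eq, h, Ne.symm h]

theorem md_step_eq (ps : List (String × String)) (a m : String) :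
    mdGroupStep (mdRows ps, PySem.List.dedup (ps.map Prod.fst)) (a, m)
      = (mdRows (ps ++ [(a, m)]), PySem.List.dedup ((ps ++ [(a, m)]).map Prod.fst)) := by
  have hmapsnoc : (ps ++ [(a, m)]).map Prod.fst = ps.map Prod.fst ++ [a] := by simp
  by_cases hmem : a ∈ PySem.List.dedup (ps.map Prod.fst)
  · -- year already present: A appends the month to the existing row
    have hded : PySem.List.dedup ((ps ++ [(a, m)]).map Prod.fst)
        = PySem.List.dedup (ps.map Prod.fst) := by
      rw [hmapsnoc, md_dedup_snoc, if_pos hmem]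
    unfold mdGroupStep
    rw [if_neg (by simpa using hmem)]
    simp only [mdRows, hded]
    congr 1
    rw [md_modify_group _ (PySem.List.nodup_dedup _) a hmem]
    refine List.map_congr_left (fun b _ => ?_)
    by_cases hb : b = a
    · subst hb; simp [md_months_snoc]
    · simp [md_months_snoc, hb]
  · -- new year: A starts a new row [a, m]
    have hafst : a ∉ ps.map Prod.fst := fun h => hmem ((PySem.List.mem_dedup _ _).mpr h)
    have hded : PySem.List.dedup ((ps ++ [(a, m)]).map Prod.fst)
        = PySem.List.dedup (ps.map Prod.fst) ++ [a] := by
      rw [hmapsnoc, md_dedup_snoc, if_neg hmem]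
    unfold mdGroupStep
    rw [if_pos (by simpa using hmem)]
    simp only [mdRows]
    rw [hded, List.map_append]
    congr 1
    congr 1
    · refine List.map_congr_left (fun b hb => ?_)
      have hba : b ≠ a := fun e => hafst (e ▸ (PySem.List.mem_dedup _ _).mp hb)
      simp [md_months_snoc, hba]
    · have hnil : mdMonths ps a = [] := by
        simp only [mdMonths, List.map_eq_nil_iff, List.filter_eq_nil_iff]
        intro p hp
        simp only [beq_iff_eq]
        exact fun e => hafst (e ▸ List.mem_map_of_mem hp)
      simp [md_months_snoc, hnil]

theorem md_fold_group (qs : List (String × String)) :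
    ∀ ps, qs.foldl mdGroupStep (mdRows ps, PySem.List.dedup (ps.map Prod.fst))
      = (mdRows (ps ++ qs), PySem.List.dedup ((ps ++ qs).map Prod.fst)) := by
  induction qs with
  | nil => intro ps; simp
  | cons q t ih =>
    intro ps
    obtain ⟨a, m⟩ := q
    rw [List.foldl_cons, md_step_eq, ih (ps ++ [(a, m)])]
    simp

-- A's whole accumulation equals folding the grouping step over the flat pair stream
theorem md_A_fold' (liste : List String) :
    ∀ st, liste.foldl (fun st releve =>
        let operation := mdChunks releve
        if PySem.Str.isIn "FRAIS" operation.headI then st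
        else (PySem.List.enumerate (operation.drop 1)).foldl
          (fun st nv =>
            if PySem.Str.isIn mdPrefixeCompte nv.2 then mdGroupStep st (mdPair operation nv.1)
            else st) st)
      st = (liste.flatMap mdPairsRel).foldl mdGroupStep st := by
  induction liste with
  | nil => intro st; rfl
  | cons r t ih =>
    intro st
    rw [List.foldl_cons, List.flatMap_cons, List.foldl_append, ih, md_relA st r]

theorem md_A_fold (liste : List String) :
    liste.foldl (fun st releve =>
        let operation := mdChunks releve
        if PySem.Str.isIn "FRAIS" operation.headI then st
        else (PySem.List.enumerate (operation.drop 1)).foldl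
          (fun st nv =>
            if PySem.Str.isIn mdPrefixeCompte nv.2 then mdGroupStep st (mdPair operation nv.1)
            else st) st)
      (([], []) : List (List String) × List String)
      = (mdRows (mdPairs liste), PySem.List.dedup ((mdPairs liste).map Prod.fst)) := by
  rw [md_A_fold' liste]
  have hg := md_fold_group (mdPairs liste) []
  simp only [List.nil_append] at hg
  exact hg

-- B's pair accumulation is the same flat pair stream
theorem md_B_fold' (liste : List String) :
    ∀ ps, liste.foldl (fun ps releve =>
        let operation := mdChunks releve
        if PySem.Str.isIn "FRAIS" operation.headI then ps
        else (PySem.List.enumerate (operation.drop 1)).foldl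
          (fun ps nv =>
            if PySem.Str.isIn mdPrefixeCompte nv.2 then ps ++ [mdPair operation nv.1]
            else ps) ps)
      ps = ps ++ liste.flatMap mdPairsRel := by
  induction liste with
  | nil => intro ps; simp
  | cons r t ih =>
    intro ps
    rw [List.foldl_cons, md_relB ps r, ih, List.flatMap_cons, List.append_assoc]

theorem md_B_fold (liste : List String) :
    liste.foldl (fun ps releve =>
        let operation := mdChunks releve
        if PySem.Str.isIn "FRAIS" operation.headI then ps
        else (PySem.List.enumerate (operation.drop 1)).foldl
          (fun ps nv =>
            if PySem.Str.isIn mdPrefixeCompte nv.2 then ps ++ [mdPair operation nv.1]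
            else ps) ps)
      ([] : List (String × String)) = mdPairs liste := by
  rw [md_B_fold' liste []]
  rfl

-- two DecidableLT instances give the same sorted list
theorem md_decLT_irrel {α κ : Type} [LT κ] (d1 d2 : DecidableLT κ)
    (xs : List α) (key : α → κ) :
    @PySem.List.sorted α κ _ d1 xs key false = @PySem.List.sorted α κ _ d2 xs key false := by
  have h : d1 = d2 := funext fun a => funext fun b => Subsingleton.elim _ _
  rw [h]

-- sorting the grouped rows = mapping the row builder over the sorted distinct years
theorem md_sorted_rows (ps : List (String × String)) :
    PySem.List.sorted (mdRows ps) (fun x => x)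
      = (PySem.List.sorted (PySem.List.dedup (ps.map Prod.fst)) (fun x => x)).map
          (fun a => a :: mdMonths ps a) := by
  rw [md_decLT_irrel _ (LinearOrder.toDecidableLT (α := List String)) (mdRows ps) (fun x => x),
      md_decLT_irrel _ (LinearOrder.toDecidableLT (α := String))
        (PySem.List.dedup (ps.map Prod.fst)) (fun x => x)]
  refine PySem.List.sorted_eq_of_perm_of_pairwise_lt (κ := List String) _ _ _ ?_ ?_
  · exact (PySem.List.sorted_perm _ _ _).map _
  · have hp : (PySem.List.sorted (PySem.List.dedup (ps.map Prod.fst))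
        (fun x => x)).Pairwise (· < ·) := by
      rw [PySem.List.dedup_eq_ofList]
      exact PySem.List.sorted_ofList_pairwise_lt _
    exact List.Pairwise.map _ (fun a b hab => List.Lex.rel hab) hp

-- ===== VERDICT (by name: the statement is the Claim_ definition above) =====
theorem mois_dispos_spec : Claim_equal_mois_dispos := by
  intro liste _ _
  show mois_dispos liste = mois_dispos_alt liste
  simp only [mois_dispos, mois_dispos_alt]
  rw [md_A_fold, md_B_fold, md_sorted_rows]
  rfl
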